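-- pv_equiv track=rewrite | github.com/brownbat/Pinyin-Converter | pinyin_converter.py | fix_u
-- ===== SOURCE A (Python) =====
-- def fix_u(m):
--     replacements = (("u:", "ü"),
--                     ("v", "ü"),
--                     ("U:", "Ü"),
--                     ("V", "Ü"))
--     for pair in replacements:
--         m = m.replace(*pair)
--     return m
-- ===== SOURCE B (Python) =====
-- def fix_u(m):
--     out = []
--     i = 0
--     n = len(m)
--     while i < n:
--         c = m[i]
--         if c == 'u' and i + 1 < n and m[i + 1] == ':':
--             out.append('\u00fc')
--             i += 2
--         elif c == 'U' and i + 1 < n and m[i + 1] == ':':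
--             out.append('\u00dc')
--             i += 2
--         elif c == 'v':
--             out.append('\u00fc')
--             i += 1
--         elif c == 'V':
--             out.append('\u00dc')
--             i += 1
--         else:
--             out.append(c)
--             i += 1
--     return ''.join(out)
-- ===== Notes on version B (the rewrite author's own statement) =====
-- stated objective: alternative
-- what changed: Replaces four chained full-string replace passes (three intermediate strings) with a single left-to-right scan with one-character lookahead that emits translated characters into a list joined once; single pass, but the interpreted loop is not faster than C-level str.replace.
import Mathlib
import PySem

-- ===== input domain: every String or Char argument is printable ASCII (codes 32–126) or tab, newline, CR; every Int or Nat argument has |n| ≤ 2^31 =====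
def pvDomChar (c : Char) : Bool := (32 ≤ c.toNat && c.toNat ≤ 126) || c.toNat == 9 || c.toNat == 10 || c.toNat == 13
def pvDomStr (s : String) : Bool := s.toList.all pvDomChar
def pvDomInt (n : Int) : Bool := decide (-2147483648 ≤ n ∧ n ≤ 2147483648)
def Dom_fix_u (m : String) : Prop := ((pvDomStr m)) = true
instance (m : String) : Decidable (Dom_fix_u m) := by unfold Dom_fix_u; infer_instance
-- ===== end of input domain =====

-- B replaces A's four full-string replace passes by one left-to-right scan with lookahead (same return value; no side effects involved).

-- ===== PORT A =====
-- A: m.replace("u:","ü").replace("v","ü").replace("U:","Ü").replace("V","Ü"), applied via a loop over the pairs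
def fix_u (m : String) : String :=
  let pairs : List (String × String) := [("u:", "ü"), ("v", "ü"), ("U:", "Ü"), ("V", "Ü")]
  pairs.foldl (fun acc p => PySem.Str.replace acc p.1 p.2) m

-- ===== PORT B =====
-- B: single scan with one-char lookahead over the characters (the while loop with index i becomes recursion on the char list)
def fixuScan : List Char → List Char
  | [] => []
  | c :: t =>
    if c = 'u' ∧ t.head? = some ':' then 'ü' :: fixuScan t.tail
    else if c = 'U' ∧ t.head? = some ':' then 'Ü' :: fixuScan t.tail
    else if c = 'v' then 'ü' :: fixuScan t
    else if c = 'V' then 'Ü' :: fixuScan t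
    else c :: fixuScan t
termination_by l => l.length
decreasing_by all_goals cases t <;> simp [List.tail]

def fix_u_alt (m : String) : String := String.ofList (fixuScan m.toList)

-- ===== PRECONDITION & SPEC =====
def Spec_fix_u (m : String) (out : String) : Prop := out = fix_u_alt m
instance (m : String) (out : String) : Decidable (Spec_fix_u m out) := by unfold Spec_fix_u; infer_instance

-- ===== CLAIM (what is proved, stated in full; the proofs are below) =====
def Claim_equal_fix_u : Prop := ∀ (m : String), Dom_fix_u m → Spec_fix_u m (fix_u m)

-- ===== LEMMAS AND PROOFS =====

-- replace with a two-char pattern [a, ':'] (a single replacement char u), accumulator-free form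
def rep2 (a u : Char) : List Char → List Char
  | [] => []
  | c :: t =>
    if c = a ∧ t.head? = some ':' then u :: rep2 a u t.tail
    else c :: rep2 a u t
termination_by l => l.length
decreasing_by all_goals cases t <;> simp [List.tail]

lemma go2_eq (a u : Char) : ∀ (fuel : Nat) (l acc : List Char), l.length ≤ fuel →
    PySem.Chars.replace.go [a, ':'] [u] fuel l acc = acc.reverse ++ rep2 a u l := by
  intro fuel
  induction fuel with
  | zero =>
    intro l acc h
    have : l = [] := List.eq_nil_of_length_eq_zero (Nat.le_zero.mp h)
    subst this
    simp [PySem.Chars.replace.go, rep2]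
  | succ n ih =>
    intro l acc h
    match l with
    | [] => simp [PySem.Chars.replace.go, rep2]
    | c :: t =>
      match t with
      | [] =>
        have h0 : ([] : List Char).length ≤ n := by simp
        simp only [PySem.Chars.replace.go]
        by_cases hc : c = a <;>
          simp [List.isPrefixOf, hc, rep2, ih _ _ h0]
      | d :: t2 =>
        simp only [PySem.Chars.replace.go]
        by_cases hc : c = a
        · by_cases hd : d = ':'
          · subst hc; subst hd
            have hlen : t2.length ≤ n := by
              have := h; simp at this; omega
            simp [List.isPrefixOf, rep2, ih _ _ hlen]
          · have hlen : (d :: t2).length ≤ n := by simp at h ⊢; omega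
            simp [List.isPrefixOf, hc, hd, rep2, ih _ _ hlen]
            intro h'; exact absurd h'.symm hd
        · have hlen : (d :: t2).length ≤ n := by simp at h ⊢; omega
          simp [List.isPrefixOf, hc, rep2, ih _ _ hlen]
          intro h'; exact absurd h'.symm hc

lemma replace2_eq (a u : Char) (l : List Char) :
    PySem.Chars.replace l [a, ':'] [u] = rep2 a u l := by
  simp [PySem.Chars.replace]
  simpa using go2_eq a u l.length l [] le_rfl

-- replace with a one-char pattern is a map
lemma go1_eq (a u : Char) : ∀ (fuel : Nat) (l acc : List Char), l.length ≤ fuel →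
    PySem.Chars.replace.go [a] [u] fuel l acc =
      acc.reverse ++ l.map (fun c => if c = a then u else c) := by
  intro fuel
  induction fuel with
  | zero =>
    intro l acc h
    have : l = [] := List.eq_nil_of_length_eq_zero (Nat.le_zero.mp h)
    subst this
    simp [PySem.Chars.replace.go]
  | succ n ih =>
    intro l acc h
    match l with
    | [] => simp [PySem.Chars.replace.go]
    | c :: t =>
      have hlen : t.length ≤ n := by simp at h; omega
      simp only [PySem.Chars.replace.go]
      by_cases hc : c = a
      · simp [List.isPrefixOf, hc, ih _ _ hlen]
      · simp [List.isPrefixOf, hc, ih _ _ hlen]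
        intro h'; exact absurd h'.symm hc

lemma replace1_eq (a u : Char) (l : List Char) :
    PySem.Chars.replace l [a] [u] = l.map (fun c => if c = a then u else c) := by
  simp [PySem.Chars.replace]
  simpa using go1_eq a u l.length l [] le_rfl

-- unfolding equations for the cons cases
lemma rep2_cons (a u c : Char) (t : List Char) :
    rep2 a u (c :: t) =
      if c = a ∧ t.head? = some ':' then u :: rep2 a u t.tail else c :: rep2 a u t := by
  rw [rep2]

lemma fixuScan_cons (c : Char) (t : List Char) :
    fixuScan (c :: t) =
      if c = 'u' ∧ t.head? = some ':' then 'ü' :: fixuScan t.tail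
      else if c = 'U' ∧ t.head? = some ':' then 'Ü' :: fixuScan t.tail
      else if c = 'v' then 'ü' :: fixuScan t
      else if c = 'V' then 'Ü' :: fixuScan t
      else c :: fixuScan t := by
  rw [fixuScan]

-- the head of the first two passes' output is ':' iff the input's head is ':'
lemma head_passes (t : List Char) :
    ((rep2 'u' 'ü' t).map (fun c => if c = 'v' then 'ü' else c)).head? = some ':' ↔
      t.head? = some ':' := by
  cases t with
  | nil => simp [rep2]
  | cons d t2 =>
    rw [rep2_cons]
    by_cases hd : d = 'u' ∧ t2.head? = some ':'
    · rw [if_pos hd]; simp [hd.1]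
    · rw [if_neg hd]
      by_cases hv : d = 'v'
      · subst hv; simp
      · simp [hv]

-- the composition of the four passes equals the single scan
lemma comp_eq : ∀ (n : Nat) (l : List Char), l.length ≤ n →
    ((rep2 'U' 'Ü' ((rep2 'u' 'ü' l).map (fun c => if c = 'v' then 'ü' else c))).map
      (fun c => if c = 'V' then 'Ü' else c)) = fixuScan l := by
  intro n
  induction n with
  | zero =>
    intro l h
    have : l = [] := List.eq_nil_of_length_eq_zero (Nat.le_zero.mp h)
    subst this; simp [rep2, fixuScan]
  | succ n ih =>
    intro l h
    match l with
    | [] => simp [rep2, fixuScan]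
    | c :: t =>
      have ht : t.length ≤ n := by simp at h; omega
      have httail : t.tail.length ≤ n := le_trans (by cases t <;> simp) ht
      rw [fixuScan_cons, rep2_cons]
      by_cases hu : c = 'u' ∧ t.head? = some ':'
      · rw [if_pos hu, if_pos hu]
        simp only [List.map_cons, if_neg (by decide : ¬('ü' : Char) = 'v'), rep2_cons]
        rw [if_neg (by rintro ⟨h1, -⟩; exact absurd h1 (by decide))]
        simp [ih _ httail]
      · rw [if_neg hu, if_neg hu]
        by_cases hU : c = 'U' ∧ t.head? = some ':'
        · rw [if_pos hU]
          obtain ⟨hc, hh⟩ := hU; subst hc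
          obtain ⟨t2, rfl⟩ : ∃ t2, t = ':' :: t2 := by
            cases t with
            | nil => simp at hh
            | cons d t2 => simp at hh; exact ⟨t2, by simp [hh]⟩
          have ht2 : t2.length ≤ n := by simp at ht; omega
          rw [rep2_cons, if_neg (by rintro ⟨h1, -⟩; exact absurd h1 (by decide))]
          simp only [List.map_cons, if_neg (by decide : ¬('U' : Char) = 'v'),
            if_neg (by decide : ¬(':' : Char) = 'v'), rep2_cons]
          rw [if_pos (by simp)]
          simp [ih _ ht2]
        · rw [if_neg hU]
          -- no two-character match at this position: the head is translated on its own
          have hcU : ¬ (c = 'U' ∧ ((rep2 'u' 'ü' t).map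
              (fun c => if c = 'v' then 'ü' else c)).head? = some ':') := by
            rintro ⟨rfl, h1⟩
            exact hU ⟨rfl, (head_passes t).mp h1⟩
          by_cases hv : c = 'v'
          · rw [if_pos hv]; subst hv
            simp only [List.map_cons, rep2_cons]
            rw [if_neg (by rintro ⟨h1, -⟩; exact absurd h1 (by decide))]
            simp [ih _ ht]
          · rw [if_neg hv]
            by_cases hV : c = 'V'
            · rw [if_pos hV]; subst hV
              simp only [List.map_cons, if_neg (by decide : ¬('V' : Char) = 'v'), rep2_cons]
              rw [if_neg (by rintro ⟨h1, -⟩; exact absurd h1 (by decide))]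
              simp [ih _ ht]
            · rw [if_neg hV]
              simp only [List.map_cons, if_neg hv, rep2_cons]
              rw [if_neg hcU]
              simp [hV, ih _ ht]

theorem toList_fix_u (m : String) : (fix_u m).toList = fixuScan m.toList := by
  have h1 : ("u:" : String).toList = ['u', ':'] := by decide
  have h2 : ("ü" : String).toList = ['ü'] := by decide
  have h3 : ("v" : String).toList = ['v'] := by decide
  have h4 : ("U:" : String).toList = ['U', ':'] := by decide
  have h5 : ("Ü" : String).toList = ['Ü'] := by decide
  have h6 : ("V" : String).toList = ['V'] := by decide
  simp only [fix_u, List.foldl, PySem.Str.toList_replace, h1, h2, h3, h4, h5, h6,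
    replace2_eq, replace1_eq]
  exact comp_eq m.toList.length m.toList le_rfl

-- ===== VERDICT (by name: the statement is the Claim_ definition above) =====
theorem fix_u_spec : Claim_equal_fix_u := by
  intro m _
  unfold Spec_fix_u fix_u_alt
  apply String.toList_inj.mp
  simp [toList_fix_u m]
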